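-- pv_equiv track=rewrite | github.com/MouroBr/Aulas_UFSC_2023.2 | lista_14/tosta.py | maiores_diagonais_acima_principal
-- ===== SOURCE A (Python) =====
-- def maiores_diagonais_acima_principal(matriz):
--     tamanho = len(matriz)
--     i = 0
--
--     # Verifica se a matriz é quadrada usando um while
--     while i < tamanho:
--         if len(matriz[i]) != tamanho:
--             return []  # Retorna uma lista vazia se a matriz não for quadrada
--         i += 1
--
--     maiores_elementos = []
--
--     i = 0
--     while i < tamanho - 1:
--         j = 0
--         diagonal_acima_principal = []
--
--         # Constrói a diagonal acima da principal sem usar for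
--         while j < tamanho - i - 1:
--             diagonal_acima_principal.append(matriz[j][i + j + 1])
--             j += 1
--
--         # Encontra o maior elemento manualmente
--         maior_elemento = diagonal_acima_principal[0]
--         j = 1
--         while j < len(diagonal_acima_principal):
--             if diagonal_acima_principal[j] > maior_elemento:
--                 maior_elemento = diagonal_acima_principal[j]
--             j += 1
--
--         maiores_elementos.append(maior_elemento)
--         i += 1
--
--     return maiores_elementos
-- ===== SOURCE B (Python) =====
-- def maiores_diagonais_acima_principal(matriz):
--     n = len(matriz)
--     if any(len(row) != n for row in matriz):
--         return []
--     maxes = [None] * (n - 1)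
--     for r in range(n):
--         row = matriz[r]
--         for d in range(n - r - 1):
--             v = row[d + r + 1]
--             if maxes[d] is None or v > maxes[d]:
--                 maxes[d] = v
--     return maxes
-- ===== Notes on version B (the rewrite author's own statement) =====
-- stated objective: faster
-- what changed: Replaces A's diagonal-by-diagonal gather (build each diagonal as an intermediate list, then scan it for its maximum) with a single row-major pass that scatters every above-diagonal cell into a per-diagonal running-maximum bucket array.
import Mathlib
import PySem

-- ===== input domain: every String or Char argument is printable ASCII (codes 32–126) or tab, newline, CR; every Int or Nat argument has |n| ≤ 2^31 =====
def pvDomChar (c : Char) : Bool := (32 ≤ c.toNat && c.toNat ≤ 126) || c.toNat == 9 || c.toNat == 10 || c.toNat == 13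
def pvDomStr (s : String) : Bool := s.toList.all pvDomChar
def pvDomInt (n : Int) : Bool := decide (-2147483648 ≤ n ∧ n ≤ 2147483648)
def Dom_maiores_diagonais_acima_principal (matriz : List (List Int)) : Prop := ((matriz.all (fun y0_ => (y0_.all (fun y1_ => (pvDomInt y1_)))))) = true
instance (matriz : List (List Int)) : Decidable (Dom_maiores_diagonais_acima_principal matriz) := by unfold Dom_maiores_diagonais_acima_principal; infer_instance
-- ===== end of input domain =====

-- B replaces A's diagonal-by-diagonal gather (build each diagonal list, then scan it for its
-- maximum) by a single row-major scatter pass that updates one running-maximum bucket per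
-- diagonal, with no intermediate diagonal lists; same O(n^2) asymptotics, measured constant-factor speedup.

-- ===== PORT A =====
-- matriz[j][c] after the square check is always in range, so getD 0 is exact there
def pvGet2 (m : List (List Int)) (j c : Nat) : Int := (m.getD j []).getD c 0

-- A's first while: early-return False on a row of the wrong length
def pvChkA (n : Nat) : List (List Int) → Bool
  | [] => true
  | r :: rs => if r.length ≠ n then false else pvChkA n rs

-- inner while building diagonal_acima_principal
def pvDiagA (m : List (List Int)) (n i j : Nat) : List Int :=
  if _h : j < n - i - 1 then pvGet2 m j (i + j + 1) :: pvDiagA m n i (j + 1) else []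
  termination_by n - i - 1 - j

-- manual-maximum while
def pvMaxA (diag : List Int) (cur : Int) (j : Nat) : Int :=
  if _h : j < diag.length then
    pvMaxA diag (if diag.getD j 0 > cur then diag.getD j 0 else cur) (j + 1)
  else cur
  termination_by diag.length - j

-- outer while over i
def pvOuterA (m : List (List Int)) (n i : Nat) : List Int :=
  if _h : i < n - 1 then
    let diag := pvDiagA m n i 0
    pvMaxA diag (diag.getD 0 0) 1 :: pvOuterA m n (i + 1)
  else []
  termination_by n - 1 - i

def maiores_diagonais_acima_principal (matriz : List (List Int)) : List Int :=
  let n := matriz.length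
  if pvChkA n matriz then pvOuterA matriz n 0 else []

-- ===== PORT B =====
-- inner for: scatter row r into the buckets of the n-r-1 diagonals it meets
def pvStep (row : List Int) (r : Nat) (mx : List (Option Int)) (d : Nat) : List (Option Int) :=
  let v := row.getD (d + r + 1) 0
  match mx.getD d none with
  | none => mx.set d (some v)
  | some cur => if v > cur then mx.set d (some v) else mx

def pvScatterRow (maxes : List (Option Int)) (row : List Int) (r k : Nat) : List (Option Int) :=
  (List.range k).foldl (pvStep row r) maxes

-- outer for over the rows
def pvScatter (m : List (List Int)) (n : Nat) : List (Option Int) :=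
  (List.range n).foldl (fun mx r => pvScatterRow mx (m.getD r []) r (n - r - 1))
    (List.replicate (n - 1) none)

def maiores_diagonais_acima_principal_alt (matriz : List (List Int)) : List Int :=
  let n := matriz.length
  if matriz.any (fun row => row.length ≠ n) then []
  -- after the pass every bucket is `some`, so `.getD 0` only strips the `some` (Source B returns the ints directly)
  else (pvScatter matriz n).map (fun o => o.getD 0)

-- ===== PRECONDITION & SPEC =====
def Spec_maiores_diagonais_acima_principal (matriz : List (List Int)) (out : List Int) : Prop := out = maiores_diagonais_acima_principal_alt matriz
instance (matriz : List (List Int)) (out : List Int) : Decidable (Spec_maiores_diagonais_acima_principal matriz out) := by unfold Spec_maiores_diagonais_acima_principal; infer_instance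

-- ===== CLAIM (what is proved, stated in full; the proofs are below) =====
def Claim_equal_maiores_diagonais_acima_principal : Prop := ∀ (matriz : List (List Int)), Dom_maiores_diagonais_acima_principal matriz → Spec_maiores_diagonais_acima_principal matriz (maiores_diagonais_acima_principal matriz)

-- ===== LEMMAS AND PROOFS =====

-- the d-th above-main diagonal, as a reference list
def pvDiagL (m : List (List Int)) (n d : Nat) : List Int :=
  (List.range (n - d - 1)).map (fun j => pvGet2 m j (d + j + 1))

def pvOptF (o : Option Int) (v : Int) : Option Int :=
  some (match o with | none => v | some cur => max cur v)

def pvOptFold (l : List Int) : Option Int := l.foldl pvOptF none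

theorem pvChkA_eq (n : Nat) (l : List (List Int)) :
    pvChkA n l = !(l.any (fun row => row.length ≠ n)) := by
  induction l with
  | nil => rfl
  | cons r rs ih => by_cases h : r.length = n <;> simp [pvChkA, h, ih]

theorem pvDiagA_eq (m : List (List Int)) (n i j : Nat) :
    pvDiagA m n i j = (List.range' j (n - i - 1 - j)).map (fun t => pvGet2 m t (i + t + 1)) := by
  by_cases h : j < n - i - 1
  · have hs : n - i - 1 - j = (n - i - 1 - (j + 1)) + 1 := by omega
    rw [pvDiagA, dif_pos h, pvDiagA_eq m n i (j + 1), hs, List.range'_succ]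
    simp
  · rw [pvDiagA, dif_neg h]
    have : n - i - 1 - j = 0 := by omega
    simp [this]
  termination_by n - i - 1 - j

theorem pvMaxA_eq (diag : List Int) (cur : Int) (j : Nat) :
    pvMaxA diag cur j = (diag.drop j).foldl max cur := by
  by_cases h : j < diag.length
  · rw [pvMaxA, dif_pos h, pvMaxA_eq diag _ (j + 1),
      List.drop_eq_getElem_cons h]
    have hg : diag.getD j 0 = diag[j] := List.getD_eq_getElem diag 0 h
    have hm : (if diag.getD j 0 > cur then diag.getD j 0 else cur) = max cur diag[j] := by
      rw [hg]; rcases le_or_gt diag[j] cur with h1 | h1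
      · rw [if_neg (by omega), max_eq_left h1]
      · rw [if_pos h1, max_eq_right (le_of_lt h1)]
    rw [hm]; rfl
  · rw [pvMaxA, dif_neg h, List.drop_eq_nil_of_le (by omega)]; rfl
  termination_by diag.length - j

theorem foldl_optF_some (xs : List Int) (a : Int) :
    xs.foldl pvOptF (some a) = some (xs.foldl max a) := by
  induction xs generalizing a with
  | nil => rfl
  | cons x xs ih => simp [pvOptF, List.foldl, ih]

theorem pvOuterA_eq (m : List (List Int)) (n i : Nat) :
    pvOuterA m n i =
      (List.range' i (n - 1 - i)).map (fun d => (pvOptFold (pvDiagL m n d)).getD 0) := by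
  by_cases h : i < n - 1
  · have hs : n - 1 - i = (n - 1 - (i + 1)) + 1 := by omega
    rw [pvOuterA, dif_pos h, pvOuterA_eq m n (i + 1), hs, List.range'_succ]
    simp only [List.map_cons]
    congr 1
    have hd : pvDiagA m n i 0 = pvDiagL m n i := by
      rw [pvDiagA_eq, pvDiagL, Nat.sub_zero, ← List.range_eq_range']
    rw [hd]
    have hne : n - i - 1 ≠ 0 := by omega
    rcases hl : pvDiagL m n i with _ | ⟨x, xs⟩
    · exfalso; apply hne; have := congrArg List.length hl; simpa [pvDiagL] using this
    · rw [pvMaxA_eq]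
      simp only [List.drop_succ_cons, List.drop_zero, List.getD_cons_zero]
      rw [pvOptFold]
      simp [List.foldl, pvOptF, foldl_optF_some]
  · rw [pvOuterA, dif_neg h]
    have : n - 1 - i = 0 := by omega
    simp [this]
  termination_by n - 1 - i

theorem pvStep_length (row : List Int) (r : Nat) (mx : List (Option Int)) (d : Nat) :
    (pvStep row r mx d).length = mx.length := by
  unfold pvStep
  rcases h : mx.getD d none with _ | cur
  · simp
  · simp only [h]; split <;> simp

theorem pvStep_getD_self (row : List Int) (r : Nat) (mx : List (Option Int)) (d : Nat)
    (hd : d < mx.length) :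
    (pvStep row r mx d).getD d none = pvOptF (mx.getD d none) (row.getD (d + r + 1) 0) := by
  unfold pvStep
  rcases h : mx.getD d none with _ | cur
  · simp only [h]
    rw [List.getD_eq_getElem _ none (by simpa using hd), List.getElem_set_self]
    rfl
  · simp only [h]
    split
    · rw [List.getD_eq_getElem _ none (by simpa using hd), List.getElem_set_self]
      simp only [pvOptF, Option.some.injEq]
      omega
    · rw [h]
      simp only [pvOptF, Option.some.injEq]
      omega

theorem pvStep_getD_ne (row : List Int) (r : Nat) (mx : List (Option Int)) (d d' : Nat)
    (hne : d ≠ d') :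
    (pvStep row r mx d).getD d' none = mx.getD d' none := by
  unfold pvStep
  rcases h : mx.getD d none with _ | cur
  · simp only [h, List.getD_eq_getElem?_getD, List.getElem?_set_ne hne]
  · simp only [h]; split
    · simp only [List.getD_eq_getElem?_getD, List.getElem?_set_ne hne]
    · rfl

theorem pvScatterRow_length (mx : List (Option Int)) (row : List Int) (r k : Nat) :
    (pvScatterRow mx row r k).length = mx.length := by
  induction k with
  | zero => rfl
  | succ k ih =>
    rw [pvScatterRow, List.range_succ, List.foldl_append]
    simp only [List.foldl_cons, List.foldl_nil]
    rw [pvStep_length]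
    exact ih

theorem pvScatterRow_getD (mx : List (Option Int)) (row : List Int) (r k : Nat)
    (hk : k ≤ mx.length) (d : Nat) :
    (pvScatterRow mx row r k).getD d none =
      if d < k then pvOptF (mx.getD d none) (row.getD (d + r + 1) 0)
      else mx.getD d none := by
  induction k generalizing d with
  | zero => simp [pvScatterRow]
  | succ k ih =>
    have hk' : k ≤ mx.length := by omega
    have hstep : pvScatterRow mx row r (k + 1) = pvStep row r (pvScatterRow mx row r k) k := by
      rw [pvScatterRow, List.range_succ, List.foldl_append]; rfl
    by_cases hd : d = k
    · subst hd
      rw [hstep, pvStep_getD_self _ _ _ _ (by rw [pvScatterRow_length]; omega),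
        ih hk' d, if_neg (lt_irrefl d), if_pos (Nat.lt_succ_self d)]
    · rw [hstep, pvStep_getD_ne _ _ _ _ _ (fun h => hd h.symm), ih hk' d]
      by_cases hdk : d < k
      · rw [if_pos hdk, if_pos (by omega)]
      · rw [if_neg hdk, if_neg (by omega)]

def pvS (m : List (List Int)) (n r : Nat) : List (Option Int) :=
  (List.range r).foldl (fun mx j => pvScatterRow mx (m.getD j []) j (n - j - 1))
    (List.replicate (n - 1) none)

theorem pvS_length (m : List (List Int)) (n r : Nat) : (pvS m n r).length = n - 1 := by
  induction r with
  | zero => simp [pvS]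
  | succ r ih =>
    rw [pvS, List.range_succ, List.foldl_append]
    simp only [List.foldl_cons, List.foldl_nil]
    rw [pvScatterRow_length]
    exact ih

theorem pvDiagL_length (m : List (List Int)) (n d : Nat) :
    (pvDiagL m n d).length = n - d - 1 := by simp [pvDiagL]

theorem pvS_getD (m : List (List Int)) (n r : Nat) (d : Nat) (hd : d < n - 1) :
    (pvS m n r).getD d none = pvOptFold ((pvDiagL m n d).take r) := by
  induction r with
  | zero => simp [pvS, pvOptFold]
  | succ r ih =>
    have hstep : pvS m n (r + 1) = pvScatterRow (pvS m n r) (m.getD r []) r (n - r - 1) := by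
      rw [pvS, List.range_succ, List.foldl_append]; rfl
    rw [hstep, pvScatterRow_getD _ _ _ _ (by rw [pvS_length]; omega), ih]
    by_cases hlt : d < n - r - 1
    · rw [if_pos hlt]
      have hr : r < (pvDiagL m n d).length := by rw [pvDiagL_length]; omega
      rw [List.take_add_one, List.getElem?_eq_getElem hr]
      simp only [Option.toList_some]
      rw [pvOptFold, pvOptFold, List.foldl_append]
      simp only [List.foldl_cons, List.foldl_nil]
      congr 1
      simp only [pvDiagL, List.getElem_map, List.getElem_range, pvGet2]
    · rw [if_neg hlt]
      have hr : (pvDiagL m n d).length ≤ r := by rw [pvDiagL_length]; omega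
      rw [List.take_add_one, List.getElem?_eq_none (by omega)]
      simp [List.take_of_length_le hr]

theorem pvScatter_map (m : List (List Int)) (n : Nat) (hn : n = m.length) :
    (pvScatter m n).map (fun o => o.getD 0) =
      (List.range (n - 1)).map (fun d => (pvOptFold (pvDiagL m n d)).getD 0) := by
  have hsc : pvScatter m n = pvS m n n := rfl
  rw [hsc]
  apply List.ext_getElem
  · simp [pvS_length]
  · intro d h1 h2
    have hd : d < n - 1 := by simpa [pvS_length] using h1
    simp only [List.getElem_map, List.getElem_range]
    have := pvS_getD m n n d hd
    rw [List.getD_eq_getElem _ none (by rw [pvS_length]; omega)] at this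
    rw [this, List.take_of_length_le (by rw [pvDiagL_length]; omega)]

-- ===== VERDICT (by name: the statement is the Claim_ definition above) =====
theorem maiores_diagonais_acima_principal_spec : Claim_equal_maiores_diagonais_acima_principal := by
  intro matriz _
  unfold Spec_maiores_diagonais_acima_principal
  show maiores_diagonais_acima_principal matriz = maiores_diagonais_acima_principal_alt matriz
  have hA : maiores_diagonais_acima_principal matriz =
      (if pvChkA matriz.length matriz = true then pvOuterA matriz matriz.length 0 else []) := rfl
  have hB : maiores_diagonais_acima_principal_alt matriz =
      (if (matriz.any fun row => decide (row.length ≠ matriz.length)) = true then []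
       else (pvScatter matriz matriz.length).map (fun o => o.getD 0)) := rfl
  rw [hA, hB]
  cases h : matriz.any (fun row => row.length ≠ matriz.length) with
  | true =>
    rw [pvChkA_eq, h]
    simp
  | false =>
    rw [pvChkA_eq, h]
    simp only [Bool.not_false, if_true, Bool.false_eq_true, if_false]
    rw [pvOuterA_eq, pvScatter_map matriz matriz.length rfl, Nat.sub_zero,
      ← List.range_eq_range']
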